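-- pv_equiv track=rewrite | github.com/xiemotongye/AnswerHelper | solve_utils.py | find_max_index2
-- ===== SOURCE A (Python) =====
-- def find_max_index(counts):
--     return counts.index(max(counts))
--
-- def find_max_index2(counts, counts2):
--     the_max = max(counts)
--     #如果有多个相同的最大值，传入这几个最大值对应的第二组参数
--     max_list = []
--     #第二组参数的原始index
--     max_index_list = []
--
--     index = 0
--     for count in counts:
--         if count == the_max:
--             max_list.append(counts2[index])
--             max_index_list.append(index)
--         index += 1
--
--     if len(max_list) > 1:
--         second_index = find_max_index(max_list)
--         return max_index_list[second_index]
--     else :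
--         return counts.index(max(counts))
-- ===== SOURCE B (Python) =====
-- def find_max_index2(counts, counts2):
--     the_max = max(counts)
--     best_index = None
--     best2 = 0
--     for i, count in enumerate(counts):
--         if count == the_max:
--             v = counts2[i]
--             if best_index is None or v > best2:
--                 best_index = i
--                 best2 = v
--     return best_index
-- ===== Notes on version B (the rewrite author's own statement) =====
-- stated objective: simpler
-- what changed: Replaces A's two intermediate lists (max values and their indices) plus a second max/index pass with a single running-best scan over enumerate(counts) that keeps only the current best index and its counts2 value.
import Mathlib
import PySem

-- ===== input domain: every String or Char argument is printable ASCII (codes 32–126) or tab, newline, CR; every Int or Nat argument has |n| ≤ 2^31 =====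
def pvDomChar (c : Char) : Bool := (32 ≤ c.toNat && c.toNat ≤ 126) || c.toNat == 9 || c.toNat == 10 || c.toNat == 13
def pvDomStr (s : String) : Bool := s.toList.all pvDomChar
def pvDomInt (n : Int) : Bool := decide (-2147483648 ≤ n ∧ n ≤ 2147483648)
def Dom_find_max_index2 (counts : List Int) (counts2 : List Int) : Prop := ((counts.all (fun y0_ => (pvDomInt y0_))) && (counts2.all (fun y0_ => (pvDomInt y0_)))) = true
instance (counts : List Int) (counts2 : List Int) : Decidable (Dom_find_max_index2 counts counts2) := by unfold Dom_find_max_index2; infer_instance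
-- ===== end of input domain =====

-- B replaces A's two intermediate lists and second max/index pass with one running-best
-- scan over enumerate(counts); same O(n) cost, simpler.


-- ===== PORT A =====
-- helper: Python's find_max_index(counts) = counts.index(max(counts))
def find_max_index (counts : List Int) : Int :=
  match PySem.List.max? counts (fun y => y) with
  | none => 0  -- max([]) raises ValueError; excluded by Pre_
  | some m => (((PySem.List.index? counts m).getD 0 : Nat) : Int)

def find_max_index2 (counts : List Int) (counts2 : List Int) : Int :=
  match PySem.List.max? counts (fun y => y) with
  | none => 0  -- max([]) raises ValueError; excluded by Pre_
  | some the_max =>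
    -- loop building max_list, max_index_list, index
    let st := counts.foldl (fun (acc : List Int × List Int × Int) count =>
      if count = the_max then
        -- counts2[index]: IndexError excluded by Pre_
        (acc.1 ++ [(PySem.List.pyGet? counts2 acc.2.2).getD 0], acc.2.1 ++ [acc.2.2], acc.2.2 + 1)
      else (acc.1, acc.2.1, acc.2.2 + 1)) ([], [], 0)
    if st.1.length > 1 then
      -- max_index_list[second_index]; in range whenever A returns
      (PySem.List.pyGet? st.2.1 (find_max_index st.1)).getD 0
    else
      find_max_index counts

-- ===== PORT B =====
def find_max_index2_alt (counts : List Int) (counts2 : List Int) : Int :=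
  match PySem.List.max? counts (fun y => y) with
  | none => 0  -- max([]) raises ValueError; excluded by Pre_
  | some the_max =>
    let st := (PySem.List.enumerate counts 0).foldl
      (fun (acc : Option (Int × Int)) p =>
        if p.2 = the_max then
          -- counts2[i]: IndexError excluded by Pre_
          let v := (PySem.List.pyGet? counts2 p.1).getD 0
          match acc with
          | none => some (p.1, v)
          | some b => if v > b.2 then some (p.1, v) else some b
        else acc) none
    match st with
    | none => 0  -- unreachable: the_max occurs in counts
    | some b => b.1

-- ===== PRECONDITION & SPEC =====
-- Pre_ excludes exactly the inputs where Python A raises: empty counts (ValueError from max)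
-- and inputs where some position holding the maximum of counts is out of range for counts2
-- (IndexError from counts2[index]).
def Pre_find_max_index2 (counts : List Int) (counts2 : List Int) : Prop :=
  counts ≠ [] ∧ ∀ i ∈ List.range counts.length,
    (∀ c ∈ counts, c ≤ counts.getD i 0) → i < counts2.length
instance (counts : List Int) (counts2 : List Int) : Decidable (Pre_find_max_index2 counts counts2) := by
  unfold Pre_find_max_index2; infer_instance

def pvWitness_find_max_index2 : List Int × List Int := ([3, 1, 3], [5, 9, 7])

def Spec_find_max_index2 (counts : List Int) (counts2 : List Int) (out : Int) : Prop := out = find_max_index2_alt counts counts2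
instance (counts : List Int) (counts2 : List Int) (out : Int) : Decidable (Spec_find_max_index2 counts counts2 out) := by unfold Spec_find_max_index2; infer_instance

-- ===== CLAIM (what is proved, stated in full; the proofs are below) =====
def Claim_equal_find_max_index2 : Prop := ∀ (counts : List Int) (counts2 : List Int), Dom_find_max_index2 counts counts2 → Pre_find_max_index2 counts counts2 → Spec_find_max_index2 counts counts2 (find_max_index2 counts counts2)

-- ===== LEMMAS AND PROOFS =====

-- the list of (index, counts2-value) pairs at positions where counts holds m
def pvPairs (m : Int) (c2 : List Int) : List Int → Int → List (Int × Int)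
  | [], _ => []
  | c :: cs, idx =>
    if c = m then (idx, (PySem.List.pyGet? c2 idx).getD 0) :: pvPairs m c2 cs (idx + 1)
    else pvPairs m c2 cs (idx + 1)

-- running best with strict improvement (first maximal element wins)
def pvFstM : (Int × Int) → List (Int × Int) → (Int × Int)
  | b, [] => b
  | b, p :: ps => if p.2 > b.2 then pvFstM p ps else pvFstM b ps

theorem pvFstM_le (b : Int × Int) (ps : List (Int × Int)) : b.2 ≤ (pvFstM b ps).2 := by
  induction ps generalizing b with
  | nil => simp [pvFstM]
  | cons p ps ih =>
    simp only [pvFstM]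
    split
    · exact le_trans (le_of_lt (by assumption)) (ih p)
    · exact ih b

theorem pvFstM_eq_self (b : Int × Int) (ps : List (Int × Int)) (h : (pvFstM b ps).2 = b.2) :
    pvFstM b ps = b := by
  induction ps generalizing b with
  | nil => simp [pvFstM]
  | cons p ps ih =>
    simp only [pvFstM] at h ⊢
    split
    · exfalso
      rename_i hgt
      rw [if_pos hgt] at h
      have := pvFstM_le p ps
      omega
    · rename_i hle
      rw [if_neg hle] at h
      exact ih b h

theorem pvFstM_snd (b : Int × Int) (ps : List (Int × Int)) :
    (pvFstM b ps).2 = (ps.map (·.2)).foldl max b.2 := by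
  induction ps generalizing b with
  | nil => simp [pvFstM]
  | cons p ps ih =>
    simp only [pvFstM, List.map_cons, List.foldl_cons]
    split
    · rw [ih p]; congr 1; omega
    · rw [ih b]; congr 1; omega

theorem pvFstM_find (b : Int × Int) (ps : List (Int × Int)) :
    List.find? (fun q => q.2 == (pvFstM b ps).2) (b :: ps) = some (pvFstM b ps) := by
  induction ps generalizing b with
  | nil => simp [pvFstM]
  | cons p ps ih =>
    simp only [pvFstM]
    split
    · rename_i hgt
      have hr : p.2 ≤ (pvFstM p ps).2 := pvFstM_le p ps
      rw [List.find?_cons_of_neg (by simp; omega)]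
      exact ih p
    · rename_i hle
      by_cases hb : (pvFstM b ps).2 = b.2
      · rw [pvFstM_eq_self b ps hb]
        simp [List.find?_cons_of_pos]
      · have hbb : b.2 < (pvFstM b ps).2 := lt_of_le_of_ne (pvFstM_le b ps) (fun h => hb h.symm)
        rw [List.find?_cons_of_neg (by simp; omega)]
        have := ih b
        rw [List.find?_cons] at this
        split at this
        · rename_i hbeq; simp at hbeq; omega
        · rw [List.find?_cons_of_neg (by simp; omega)]
          exact this

-- extracting via index-of-max on the snd projection equals find? on the pairs
theorem pvIdxBridge (ps : List (Int × Int)) (v : Int) (q : Int × Int)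
    (h : List.find? (fun q => q.2 == v) ps = some q) :
    (PySem.List.pyGet? (ps.map (·.1))
        (((PySem.List.index? (ps.map (·.2)) v).getD 0 : Nat) : Int)).getD 0 = q.1 := by
  induction ps with
  | nil => simp at h
  | cons p ps ih =>
    rw [List.find?_cons] at h
    split at h
    · rename_i hv
      simp at hv
      cases h
      rw [List.map_cons, List.map_cons, ← hv, PySem.List.index?_cons_self]
      simp [PySem.List.pyGet?, PySem.List.pyIdx?]
    · rename_i hv
      simp at hv
      have hmem : v ∈ ps.map (·.2) := by
        have hq := List.find?_some h
        have hqm := List.mem_of_find?_eq_some h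
        simp at hq
        exact List.mem_map.mpr ⟨q, hqm, hq⟩
      obtain ⟨k, hk⟩ := Option.isSome_iff_exists.mp ((PySem.List.index?_isSome_iff _ _).mpr hmem)
      rw [List.map_cons, List.map_cons, PySem.List.index?_cons_of_ne _ hv, hk]
      have := ih h
      rw [hk] at this
      simp only [Option.map_some, Option.getD_some] at this ⊢
      rw [show ((k + 1 : Nat) : Int) = (k : Int) + 1 by push_cast; ring,
        PySem.List.pyGet?_cons_succ]
      exact this

-- A's loop builds exactly the snd/fst projections of pvPairs
theorem pvAfold (m : Int) (c2 : List Int) (cs : List Int) (ml mil : List Int) (idx : Int) :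
    cs.foldl (fun (acc : List Int × List Int × Int) count =>
      if count = m then
        (acc.1 ++ [(PySem.List.pyGet? c2 acc.2.2).getD 0], acc.2.1 ++ [acc.2.2], acc.2.2 + 1)
      else (acc.1, acc.2.1, acc.2.2 + 1)) (ml, mil, idx)
    = (ml ++ (pvPairs m c2 cs idx).map (·.2), mil ++ (pvPairs m c2 cs idx).map (·.1),
       idx + cs.length) := by
  induction cs generalizing ml mil idx with
  | nil => simp [pvPairs]
  | cons c cs ih =>
    simp only [List.foldl_cons, pvPairs]
    split
    · rw [ih]; refine Prod.ext (by simp) (Prod.ext (by simp) ?_); simp; omega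
    · rw [ih]; refine Prod.ext (by simp) (Prod.ext (by simp) ?_); simp; omega

-- B's loop is the running best over pvPairs
def pvBestF : Option (Int × Int) → List (Int × Int) → Option (Int × Int)
  | acc, [] => acc
  | acc, p :: ps =>
    pvBestF (match acc with
             | none => some p
             | some b => if p.2 > b.2 then some p else some b) ps

theorem pvBfold (m : Int) (c2 : List Int) (cs : List Int) (acc : Option (Int × Int)) (idx : Int) :
    (PySem.List.enumerate cs idx).foldl
      (fun (acc : Option (Int × Int)) p =>
        if p.2 = m then
          let v := (PySem.List.pyGet? c2 p.1).getD 0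
          match acc with
          | none => some (p.1, v)
          | some b => if v > b.2 then some (p.1, v) else some b
        else acc) acc
    = pvBestF acc (pvPairs m c2 cs idx) := by
  induction cs generalizing acc idx with
  | nil => simp [PySem.List.enumerate_nil, pvPairs, pvBestF]
  | cons c cs ih =>
    rw [PySem.List.enumerate_cons, List.foldl_cons]
    simp only [pvPairs]
    split
    · rw [ih]; rfl
    · rw [ih]

theorem pvBestF_some (b : Int × Int) (ps : List (Int × Int)) :
    pvBestF (some b) ps = some (pvFstM b ps) := by
  induction ps generalizing b with
  | nil => rfl
  | cons p ps ih =>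
    simp only [pvBestF, pvFstM]
    split <;> exact ih _

-- the head of pvPairs is the first occurrence of m
theorem pvPairs_head (m : Int) (c2 : List Int) (cs : List Int) (idx : Int) :
    (pvPairs m c2 cs idx).head? =
      (PySem.List.index? cs m).map
        (fun j => (idx + (j : Int), (PySem.List.pyGet? c2 (idx + (j : Int))).getD 0)) := by
  induction cs generalizing idx with
  | nil => simp [pvPairs, PySem.List.index?]
  | cons c cs ih =>
    simp only [pvPairs]
    split
    · rename_i hc
      subst hc
      rw [PySem.List.index?_cons_self]
      simp
    · rename_i hc
      rw [PySem.List.index?_cons_of_ne _ hc, ih (idx + 1)]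
      cases h : PySem.List.index? cs m with
      | none => simp
      | some j =>
        have e : idx + 1 + (j : Int) = idx + ((j + 1 : Nat) : Int) := by push_cast; ring
        simp [e]

theorem pvPairs_ne_nil (m : Int) (c2 : List Int) (cs : List Int) (idx : Int) (h : m ∈ cs) :
    pvPairs m c2 cs idx ≠ [] := by
  induction cs generalizing idx with
  | nil => simp at h
  | cons c cs ih =>
    simp only [pvPairs]
    split
    · simp
    · rename_i hc
      rcases List.mem_cons.mp h with h' | h'
      · exact absurd h'.symm hc
      · exact ih (idx + 1) h'

-- ===== VERDICT (by name: the statement is the Claim_ definition above) =====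
theorem find_max_index2_spec : Claim_equal_find_max_index2 := by
  intro counts counts2 _ hpre
  unfold Spec_find_max_index2 find_max_index2 find_max_index2_alt
  obtain ⟨hne, _⟩ := hpre
  obtain ⟨x, t, rfl⟩ := List.exists_cons_of_ne_nil hne
  rw [PySem.List.max?_id_cons]
  set m := t.foldl max x with hm
  have hmem : m ∈ x :: t := by
    have : PySem.List.max? (x :: t) (fun y => y) = some m := PySem.List.max?_id_cons x t
    exact PySem.List.max?_mem this
  simp only [pvAfold, pvBfold, List.nil_append]
  set ps := pvPairs m counts2 (x :: t) 0 with hps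
  have hpsne : ps ≠ [] := pvPairs_ne_nil m counts2 (x :: t) 0 hmem
  obtain ⟨p, rest, hcons⟩ := List.exists_cons_of_ne_nil hpsne
  rw [hcons]
  simp only [pvBestF, pvBestF_some]
  by_cases hlen : (p :: rest).length > 1
  · -- the tie branch: index-of-max over the value list
    rw [if_pos (by simpa using hlen)]
    unfold find_max_index
    rw [show ((p :: rest).map (·.2)) = p.2 :: rest.map (·.2) from rfl,
      PySem.List.max?_id_cons]
    have hsnd : (rest.map (·.2)).foldl max p.2 = (pvFstM p rest).2 := (pvFstM_snd p rest).symm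
    rw [hsnd]
    exact pvIdxBridge (p :: rest) (pvFstM p rest).2 (pvFstM p rest) (pvFstM_find p rest)
  · -- single maximum: ps = [p], both return the first index of m
    rw [if_neg (by simpa using hlen)]
    have hrest : rest = [] := by
      cases rest with
      | nil => rfl
      | cons a b => simp at hlen
    subst hrest
    simp only [pvFstM]
    -- A returns counts.index(m); B returns p.1; pvPairs_head identifies them
    unfold find_max_index
    rw [PySem.List.max?_id_cons, ← hm]
    obtain ⟨j, hj⟩ := Option.isSome_iff_exists.mp
      ((PySem.List.index?_isSome_iff _ _).mpr hmem)
    have hh := pvPairs_head m counts2 (x :: t) 0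
    rw [← hps, hcons, hj] at hh
    simp at hh
    show (((PySem.List.index? (x :: t) m).getD 0 : Nat) : Int) = p.1
    rw [hj]
    simp [hh]
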